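-- pv_equiv track=rewrite | github.com/flatironinstitute/masala_public | code_templates/generate_library_api.py | parse_unordered_map
-- ===== SOURCE A (Python) =====
-- def parse_unordered_map( inputclass : str ) -> tuple :
--     inchevron = False
--     inchevron2 = 0
--     stringcopy = ""
--     for i in range(0, len(inputclass) ) :
--         if inchevron == False :
--             if inputclass[i] == "<" :
--                 inchevron = True
--                 stringcopy += inputclass[i]
--             else :
--                 stringcopy += "#"
--         else :
--             if inchevron2 == 0 :
--                 if inputclass[i] == "<" :
--                     inchevron2 = True
--                     stringcopy += "#"
--                 elif inputclass[i] == ">" :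
--                     inchevron = False
--                     stringcopy += inputclass[i]
--                 else :
--                     stringcopy += inputclass[i]
--             else :
--                 if inputclass[i] == ">" :
--                     inchevron2 -= 1
--                     stringcopy += "#"
--                 elif inputclass[i] == "<" :
--                     inchevron2 += 1
--                     stringcopy += "#"
--                 else :
--                     stringcopy += "#"
--     firstchevron = stringcopy.find( "<" )
--     lastchevron = stringcopy.rfind( ">" )
--     firstcomma = stringcopy.find( "," )
--     lastcomma = stringcopy.rfind( "," )
--     if lastcomma == firstcomma :
--         lastcomma = -1
--
--     return firstchevron, lastchevron, firstcomma, lastcomma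
-- ===== SOURCE B (Python) =====
-- def parse_unordered_map( inputclass : str ) -> tuple :
--     # One linear pass tracking the four indices directly with a single depth
--     # counter; no masked copy of the string, no find/rfind passes.
--     firstchevron = lastchevron = firstcomma = lastcomma = -1
--     depth = 0
--     for i, ch in enumerate(inputclass):
--         if depth == 0:
--             if ch == "<":
--                 if firstchevron < 0:
--                     firstchevron = i
--                 depth = 1
--         elif depth == 1:
--             if ch == "<":
--                 depth = 2
--             elif ch == ">":
--                 depth = 0
--                 lastchevron = i
--             elif ch == ",":
--                 if firstcomma < 0:
--                     firstcomma = i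
--                 lastcomma = i
--         else:
--             if ch == "<":
--                 depth += 1
--             elif ch == ">":
--                 depth -= 1
--     if lastcomma == firstcomma:
--         lastcomma = -1
--     return firstchevron, lastchevron, firstcomma, lastcomma
-- ===== Notes on version B (the rewrite author's own statement) =====
-- stated objective: simpler
-- what changed: Instead of building a masked copy of the string and making four extra find/rfind passes over it, B tracks the four indices directly in one linear pass with a single integer depth counter.
import Mathlib
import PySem

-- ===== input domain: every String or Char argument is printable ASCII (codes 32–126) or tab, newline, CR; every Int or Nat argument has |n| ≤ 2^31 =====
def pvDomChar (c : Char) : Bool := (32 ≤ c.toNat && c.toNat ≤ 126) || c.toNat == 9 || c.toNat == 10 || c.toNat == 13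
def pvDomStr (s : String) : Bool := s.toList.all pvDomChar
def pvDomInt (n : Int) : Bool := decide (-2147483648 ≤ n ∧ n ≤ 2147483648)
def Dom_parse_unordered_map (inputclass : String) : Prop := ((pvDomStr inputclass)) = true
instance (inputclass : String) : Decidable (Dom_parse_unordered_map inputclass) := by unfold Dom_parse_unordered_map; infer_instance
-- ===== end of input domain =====

-- B replaces A's masked string copy + four find/rfind passes by one pass that
-- tracks the four indices directly (objective: simpler; return value only).

-- ===== PORT A =====
-- loop body of A: state = (inchevron, inchevron2, stringcopy); 'inchevron2 = True' is the Int 1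
def paStep (st : Bool × Int × List Char) (c : Char) : Bool × Int × List Char :=
  match st with
  | (inchevron, inchevron2, stringcopy) =>
    if inchevron = false then
      if c = '<' then (true, inchevron2, stringcopy ++ [c])
      else (inchevron, inchevron2, stringcopy ++ ['#'])
    else
      if inchevron2 = 0 then
        if c = '<' then (inchevron, 1, stringcopy ++ ['#'])
        else if c = '>' then (false, inchevron2, stringcopy ++ [c])
        else (inchevron, inchevron2, stringcopy ++ [c])
      else
        if c = '>' then (inchevron, inchevron2 - 1, stringcopy ++ ['#'])
        else if c = '<' then (inchevron, inchevron2 + 1, stringcopy ++ ['#'])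
        else (inchevron, inchevron2, stringcopy ++ ['#'])

def parse_unordered_map (inputclass : String) : Int × Int × Int × Int :=
  let cs := inputclass.toList
  let st := (PySem.List.pyRange 0 (PySem.List.len cs)).foldl
      (fun acc i => paStep acc (PySem.List.pyGetD cs i '#')) (false, (0 : Int), ([] : List Char))
  let stringcopy := st.2.2
  let firstchevron := PySem.Chars.find stringcopy ['<']
  let lastchevron := PySem.Chars.rfind stringcopy ['>']
  let firstcomma := PySem.Chars.find stringcopy [',']
  let lastcomma0 := PySem.Chars.rfind stringcopy [',']
  let lastcomma := if lastcomma0 = firstcomma then -1 else lastcomma0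
  (firstchevron, lastchevron, firstcomma, lastcomma)

-- ===== PORT B =====
-- loop body of B: state = (depth, firstchevron, lastchevron, firstcomma, lastcomma)
def pbStep (st : Int × Int × Int × Int × Int) (ic : Int × Char) : Int × Int × Int × Int × Int :=
  match st, ic with
  | (depth, firstchevron, lastchevron, firstcomma, lastcomma), (i, ch) =>
    if depth = 0 then
      if ch = '<' then (1, if firstchevron < 0 then i else firstchevron, lastchevron, firstcomma, lastcomma)
      else st
    else if depth = 1 then
      if ch = '<' then (2, firstchevron, lastchevron, firstcomma, lastcomma)
      else if ch = '>' then (0, firstchevron, i, firstcomma, lastcomma)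
      else if ch = ',' then (depth, firstchevron, lastchevron, if firstcomma < 0 then i else firstcomma, i)
      else st
    else
      if ch = '<' then (depth + 1, firstchevron, lastchevron, firstcomma, lastcomma)
      else if ch = '>' then (depth - 1, firstchevron, lastchevron, firstcomma, lastcomma)
      else st

def parse_unordered_map_alt (inputclass : String) : Int × Int × Int × Int :=
  let st := (PySem.List.enumerate inputclass.toList).foldl pbStep (0, -1, -1, -1, -1)
  match st with
  | (_, firstchevron, lastchevron, firstcomma, lastcomma) =>
    (firstchevron, lastchevron, firstcomma, if lastcomma = firstcomma then -1 else lastcomma)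

-- ===== PRECONDITION & SPEC =====
def Spec_parse_unordered_map (inputclass : String) (out : Int × Int × Int × Int) : Prop := out = parse_unordered_map_alt inputclass
instance (inputclass : String) (out : Int × Int × Int × Int) : Decidable (Spec_parse_unordered_map inputclass out) := by unfold Spec_parse_unordered_map; infer_instance

-- ===== CLAIM (what is proved, stated in full; the proofs are below) =====
def Claim_equal_parse_unordered_map : Prop := ∀ (inputclass : String), Dom_parse_unordered_map inputclass → Spec_parse_unordered_map inputclass (parse_unordered_map inputclass)

-- ===== LEMMAS AND PROOFS =====

-- unfolding equations for the PySem search primitives (single-character needle)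
lemma fgo_nil (c : Char) (k : Nat) : PySem.Chars.find.go [c] [] k = -1 := by
  rw [PySem.Chars.find.go.eq_def]; simp

lemma fgo_cons (c x : Char) (t : List Char) (k : Nat) :
    PySem.Chars.find.go [c] (x :: t) k = if c = x then (k : Int) else PySem.Chars.find.go [c] t (k + 1) := by
  rw [PySem.Chars.find.go.eq_def]; simp [List.isPrefixOf]

lemma rgo_zero (s : List Char) (c : Char) :
    PySem.Chars.rfind.go s [c] 0 = if List.isPrefixOf [c] s then 0 else -1 := by
  rw [PySem.Chars.rfind.go.eq_def]

lemma rgo_succ (s : List Char) (c : Char) (j : Nat) :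
    PySem.Chars.rfind.go s [c] (j + 1) =
      if List.isPrefixOf [c] (s.drop (j + 1)) then ((j : Int) + 1) else PySem.Chars.rfind.go s [c] j := by
  rw [PySem.Chars.rfind.go.eq_def]; push_cast; rfl

lemma pfx_append (c d : Char) (hcd : c ≠ d) (u : List Char) :
    List.isPrefixOf [c] (u ++ [d]) = List.isPrefixOf [c] u := by
  cases u <;> simp [List.isPrefixOf, hcd]

lemma fgo_append (c d : Char) (s : List Char) (k : Nat) :
    PySem.Chars.find.go [c] (s ++ [d]) k =
      if PySem.Chars.find.go [c] s k = -1 then (if c = d then ((k + s.length : Nat) : Int) else -1)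
      else PySem.Chars.find.go [c] s k := by
  induction s generalizing k with
  | nil => simp [fgo_nil, fgo_cons]
  | cons x t ih =>
    simp only [List.cons_append, fgo_cons]
    by_cases hc : c = x
    · have : ((k : Int)) ≠ -1 := by omega
      simp [hc, this]
    · have hlen : k + 1 + t.length = k + (x :: t).length := by simp; omega
      simp only [hc, if_false, ih (k + 1), hlen]

lemma find_append (c d : Char) (s : List Char) :
    PySem.Chars.find (s ++ [d]) [c] =
      if PySem.Chars.find s [c] = -1 then (if c = d then (s.length : Int) else -1)
      else PySem.Chars.find s [c] := by
  simpa using fgo_append c d s 0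

lemma rgo_append (c d : Char) (hcd : c ≠ d) (s : List Char) :
    ∀ j, j ≤ s.length → PySem.Chars.rfind.go (s ++ [d]) [c] j = PySem.Chars.rfind.go s [c] j := by
  intro j
  induction j with
  | zero => intro _; rw [rgo_zero, rgo_zero, pfx_append c d hcd]
  | succ j ih =>
    intro hj
    rw [rgo_succ, rgo_succ, List.drop_append_of_le_length hj, pfx_append c d hcd,
      ih (by omega)]

lemma rfind_append (c d : Char) (s : List Char) :
    PySem.Chars.rfind (s ++ [d]) [c] =
      if c = d then (s.length : Int) else PySem.Chars.rfind s [c] := by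
  unfold PySem.Chars.rfind
  have hL : (s ++ [d]).length = s.length + 1 := by simp
  rw [hL, rgo_succ]
  have hdrop : (s ++ [d]).drop (s.length + 1) = [] := by simp
  rw [hdrop]
  simp only [List.isPrefixOf, Bool.false_eq_true, if_false]
  cases hs : s.length with
  | zero =>
    have hnil : s = [] := List.eq_nil_of_length_eq_zero hs
    subst hnil
    rw [rgo_zero, rgo_zero]
    simp only [List.nil_append]
    by_cases hcd : c = d
    · subst hcd; simp [List.isPrefixOf]
    · have h1 : ([c].isPrefixOf [d]) = false := by simp [List.isPrefixOf, hcd]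
      have h2 : ([c].isPrefixOf ([] : List Char)) = false := by simp [List.isPrefixOf]
      simp only [h1, h2, Bool.false_eq_true, if_false, if_neg hcd]
  | succ m =>
    rw [rgo_succ, List.drop_append_of_le_length (by omega), rgo_succ]
    have hdrop2 : s.drop (m + 1) = [] := List.drop_eq_nil_of_le (by omega)
    rw [hdrop2]
    simp only [List.nil_append]
    by_cases hcd : c = d
    · have h1 : ([c].isPrefixOf [d]) = true := by simp [List.isPrefixOf, hcd]
      simp only [h1, if_true, if_pos hcd]
      omega
    · have h1 : ([c].isPrefixOf [d]) = false := by simp [List.isPrefixOf, hcd]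
      have h2 : ([c].isPrefixOf ([] : List Char)) = false := by simp [List.isPrefixOf]
      simp only [h1, h2, Bool.false_eq_true, if_false, if_neg hcd]
      exact rgo_append c d hcd s m (by omega)

lemma find_append_same (c : Char) (s : List Char) :
    PySem.Chars.find (s ++ [c]) [c] =
      if PySem.Chars.find s [c] = -1 then (s.length : Int) else PySem.Chars.find s [c] := by
  rw [find_append]; simp

lemma find_append_ne (c d : Char) (h : c ≠ d) (s : List Char) :
    PySem.Chars.find (s ++ [d]) [c] = PySem.Chars.find s [c] := by
  rw [find_append, if_neg h]
  have := PySem.Chars.neg_one_le_find s [c]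
  split_ifs <;> omega

lemma rfind_append_same (c : Char) (s : List Char) :
    PySem.Chars.rfind (s ++ [c]) [c] = (s.length : Int) := by
  rw [rfind_append, if_pos rfl]

lemma rfind_append_ne (c d : Char) (h : c ≠ d) (s : List Char) :
    PySem.Chars.rfind (s ++ [d]) [c] = PySem.Chars.rfind s [c] := by
  rw [rfind_append, if_neg h]

-- depth encoding relating A's (inchevron, inchevron2) to B's single counter
def depthOf (b : Bool) (n : Int) : Int := if b then n + 1 else 0

lemma step_inv (b : Bool) (n : Int) (sc : List Char) (c : Char)
    (hn : 0 ≤ n) (hb : b = false → n = 0) :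
    0 ≤ (paStep (b, n, sc) c).2.1 ∧ ((paStep (b, n, sc) c).1 = false → (paStep (b, n, sc) c).2.1 = 0) := by
  cases b with
  | false =>
    have hn0 : n = 0 := hb rfl
    subst hn0
    by_cases hc : c = '<' <;> simp [paStep, hc]
  | true =>
    simp only [paStep]
    by_cases h0 : n = 0
    · by_cases hc : c = '<' <;> by_cases hg : c = '>' <;>
        simp [h0, hc, hg]
    · by_cases hc : c = '<' <;> by_cases hg : c = '>' <;>
        simp [h0, hc, hg] <;> omega

lemma step_len (b : Bool) (n : Int) (sc : List Char) (c : Char) :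
    (paStep (b, n, sc) c).2.2.length = sc.length + 1 := by
  cases b <;> simp only [paStep] <;> split_ifs <;> simp

lemma step_eq (b : Bool) (n : Int) (sc : List Char) (c : Char)
    (hn : 0 ≤ n) (hb : b = false → n = 0) :
    pbStep (depthOf b n, PySem.Chars.find sc ['<'], PySem.Chars.rfind sc ['>'],
            PySem.Chars.find sc [','], PySem.Chars.rfind sc [',']) ((sc.length : Int), c)
    = (depthOf (paStep (b, n, sc) c).1 (paStep (b, n, sc) c).2.1,
       PySem.Chars.find (paStep (b, n, sc) c).2.2 ['<'],
       PySem.Chars.rfind (paStep (b, n, sc) c).2.2 ['>'],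
       PySem.Chars.find (paStep (b, n, sc) c).2.2 [','],
       PySem.Chars.rfind (paStep (b, n, sc) c).2.2 [','])  := by
  have h1 := PySem.Chars.neg_one_le_find sc ['<']
  have h2 := PySem.Chars.neg_one_le_find sc [',']
  cases b with
  | false =>
    have hn0 : n = 0 := hb rfl
    subst hn0
    by_cases hc : c = '<'
    · subst hc
      have hA : paStep (false, 0, sc) '<' = (true, 0, sc ++ ['<']) := by simp [paStep]
      rw [hA]
      simp [pbStep, depthOf, find_append_same, find_append_ne, rfind_append_ne]
      split_ifs <;> omega
    · have hA : paStep (false, 0, sc) c = (false, 0, sc ++ ['#']) := by simp [paStep, hc]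
      rw [hA]
      simp [pbStep, depthOf, hc,
        find_append_ne _ _ (by decide : ('<':Char) ≠ '#'),
        find_append_ne _ _ (by decide : (',':Char) ≠ '#'),
        rfind_append_ne _ _ (by decide : ('>':Char) ≠ '#'),
        rfind_append_ne _ _ (by decide : (',':Char) ≠ '#')]
  | true =>
    by_cases h0 : n = 0
    · subst h0
      by_cases hc : c = '<'
      · subst hc
        have hA : paStep (true, 0, sc) '<' = (true, 1, sc ++ ['#']) := by simp [paStep]
        rw [hA]
        simp [pbStep, depthOf,
          find_append_ne _ _ (by decide : ('<':Char) ≠ '#'),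
          find_append_ne _ _ (by decide : (',':Char) ≠ '#'),
          rfind_append_ne _ _ (by decide : ('>':Char) ≠ '#'),
          rfind_append_ne _ _ (by decide : (',':Char) ≠ '#')]
      · by_cases hg : c = '>'
        · subst hg
          have hA : paStep (true, 0, sc) '>' = (false, 0, sc ++ ['>']) := by simp [paStep]
          rw [hA]
          simp [pbStep, depthOf, rfind_append_same,
            find_append_ne _ _ (by decide : ('<':Char) ≠ '>'),
            find_append_ne _ _ (by decide : (',':Char) ≠ '>'),
            rfind_append_ne _ _ (by decide : (',':Char) ≠ '>')]
        · by_cases hm : c = ','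
          · subst hm
            have hA : paStep (true, 0, sc) ',' = (true, 0, sc ++ [',']) := by
              simp [paStep]
            rw [hA]
            simp [pbStep, depthOf, find_append_same, rfind_append_same,
              find_append_ne _ _ (by decide : ('<':Char) ≠ ','),
              rfind_append_ne _ _ (by decide : ('>':Char) ≠ ',')]
            split_ifs <;> omega
          · have hA : paStep (true, 0, sc) c = (true, 0, sc ++ [c]) := by
              simp [paStep, hc, hg]
            rw [hA]
            have hc' : ('<':Char) ≠ c := fun h => hc h.symm
            have hg' : ('>':Char) ≠ c := fun h => hg h.symm
            have hm' : (',':Char) ≠ c := fun h => hm h.symm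
            simp [pbStep, depthOf, hc, hg, hm,
              find_append_ne _ _ hc', find_append_ne _ _ hm',
              rfind_append_ne _ _ hg', rfind_append_ne _ _ hm']
    · have hd0 : n + 1 ≠ 0 := by omega
      by_cases hg : c = '>'
      · subst hg
        have hA : paStep (true, n, sc) '>' = (true, n - 1, sc ++ ['#']) := by
          simp [paStep, h0]
        rw [hA]
        simp [pbStep, depthOf, hd0, h0,
          find_append_ne _ _ (by decide : ('<':Char) ≠ '#'),
          find_append_ne _ _ (by decide : (',':Char) ≠ '#'),
          rfind_append_ne _ _ (by decide : ('>':Char) ≠ '#'),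
          rfind_append_ne _ _ (by decide : (',':Char) ≠ '#')]
      · by_cases hc : c = '<'
        · subst hc
          have hA : paStep (true, n, sc) '<' = (true, n + 1, sc ++ ['#']) := by
            simp [paStep, h0]
          rw [hA]
          simp [pbStep, depthOf, hd0, h0,
            find_append_ne _ _ (by decide : ('<':Char) ≠ '#'),
            find_append_ne _ _ (by decide : (',':Char) ≠ '#'),
            rfind_append_ne _ _ (by decide : ('>':Char) ≠ '#'),
            rfind_append_ne _ _ (by decide : (',':Char) ≠ '#')]
        · have hA : paStep (true, n, sc) c = (true, n, sc ++ ['#']) := by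
            simp [paStep, h0, hc, hg]
          rw [hA]
          simp [pbStep, depthOf, hd0, h0, hc, hg,
            find_append_ne _ _ (by decide : ('<':Char) ≠ '#'),
            find_append_ne _ _ (by decide : (',':Char) ≠ '#'),
            rfind_append_ne _ _ (by decide : ('>':Char) ≠ '#'),
            rfind_append_ne _ _ (by decide : (',':Char) ≠ '#')]

lemma main_fold (rest : List Char) : ∀ (b : Bool) (n : Int) (sc : List Char),
    0 ≤ n → (b = false → n = 0) →
    (PySem.List.enumerate rest ((sc.length : Int))).foldl pbStep
      (depthOf b n, PySem.Chars.find sc ['<'], PySem.Chars.rfind sc ['>'],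
       PySem.Chars.find sc [','], PySem.Chars.rfind sc [','])
    = (depthOf (rest.foldl paStep (b, n, sc)).1 (rest.foldl paStep (b, n, sc)).2.1,
       PySem.Chars.find (rest.foldl paStep (b, n, sc)).2.2 ['<'],
       PySem.Chars.rfind (rest.foldl paStep (b, n, sc)).2.2 ['>'],
       PySem.Chars.find (rest.foldl paStep (b, n, sc)).2.2 [','],
       PySem.Chars.rfind (rest.foldl paStep (b, n, sc)).2.2 [',']) := by
  induction rest with
  | nil => intro b n sc _ _; simp [PySem.List.enumerate]
  | cons c rest' ih =>
    intro b n sc hn hb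
    have hen : PySem.List.enumerate (c :: rest') ((sc.length : Int))
        = ((sc.length : Int), c) :: PySem.List.enumerate rest' ((sc.length : Int) + 1) := by
      simp [PySem.List.enumerate]
    rw [hen, List.foldl_cons, List.foldl_cons, step_eq b n sc c hn hb]
    obtain ⟨hn', hb'⟩ := step_inv b n sc c hn hb
    have hlen : ((sc.length : Int) + 1) = (((paStep (b, n, sc) c).2.2.length : Int)) := by
      rw [step_len]; push_cast; ring
    rw [hlen]
    exact ih (paStep (b, n, sc) c).1 (paStep (b, n, sc) c).2.1 (paStep (b, n, sc) c).2.2 hn' hb'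

-- ===== VERDICT (by name: the statement is the Claim_ definition above) =====
theorem parse_unordered_map_spec : Claim_equal_parse_unordered_map := by
  intro inputclass _
  unfold Spec_parse_unordered_map parse_unordered_map parse_unordered_map_alt
  dsimp only
  have hA := PySem.List.foldl_pyRange_pyGetD inputclass.toList '#' paStep
      (false, (0 : Int), ([] : List Char)) (a := 0) (by norm_num)
  simp only [Int.toNat_zero, List.drop_zero] at hA
  rw [hA]
  have h0 : ((List.length ([] : List Char) : Int)) = 0 := by simp
  have hmain := main_fold inputclass.toList false 0 [] (by norm_num) (fun _ => rfl)
  rw [h0] at hmain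
  have hinit : (depthOf false 0, PySem.Chars.find [] ['<'], PySem.Chars.rfind [] ['>'],
      PySem.Chars.find [] [','], PySem.Chars.rfind [] [',']) = ((0 : Int), -1, -1, -1, -1) := by
    decide
  rw [hinit] at hmain
  rw [hmain]
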